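-- pv_equiv track=rewrite | github.com/nknavkal/projecto-patronum | SASolver.py | startingOrder
-- ===== SOURCE A (Python) =====
-- def startingOrder(numAppears):
--     a = []
--     b = []
--     for key, value in sorted(iter(numAppears.items()), key=lambda k_v1: (k_v1[1],k_v1[0])):
--         a.append(key)
--         temp = b
--         b = a
--         a = temp
--     b.reverse()
--     return a + b
-- ===== SOURCE B (Python) =====
-- def startingOrder(numAppears):
--     s = [k for k, _ in sorted(numAppears.items(), key=lambda kv: (kv[1], kv[0]))]
--     # place keys outside-in, largest first: the head of a suffix of even length
--     # belongs at the current front, of odd length at the current back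
--     out = []
--     for m, x in enumerate(reversed(s), start=1):
--         if m % 2 == 0:
--             out.insert(0, x)
--         else:
--             out.append(x)
--     return out
-- ===== Notes on version B (the rewrite author's own statement) =====
-- stated objective: alternative
-- what changed: Replaces A's alternating two-accumulator append-and-swap loop (plus final reverse and concatenation) with a single outside-in placement pass over the reversed sorted key list: each key is inserted at the front when its suffix length is even and appended at the back when it is odd, with no accumulator pair, no swap and no final reverse.
import Mathlib
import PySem

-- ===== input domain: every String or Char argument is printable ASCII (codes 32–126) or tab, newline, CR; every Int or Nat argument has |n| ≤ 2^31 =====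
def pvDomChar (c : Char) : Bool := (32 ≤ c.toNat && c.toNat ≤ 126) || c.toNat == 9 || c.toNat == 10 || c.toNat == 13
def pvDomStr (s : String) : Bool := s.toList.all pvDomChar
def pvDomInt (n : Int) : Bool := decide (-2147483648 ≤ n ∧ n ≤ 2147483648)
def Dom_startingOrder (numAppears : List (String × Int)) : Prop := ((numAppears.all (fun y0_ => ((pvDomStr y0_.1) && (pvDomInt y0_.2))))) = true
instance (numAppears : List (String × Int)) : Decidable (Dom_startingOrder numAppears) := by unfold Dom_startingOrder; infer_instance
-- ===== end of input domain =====

-- B replaces A's alternating append-and-swap accumulator loop with one outside-in placement pass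
-- over the reversed sorted key list: a key whose suffix length is even goes to the current front,
-- odd to the current back (objective: alternative).

-- ===== PORT A =====
-- the dict argument: items() in insertion order with unique keys (= PySem.Dict.ofList)
def startingOrder (numAppears : List (String × Int)) : List String :=
  let items := (PySem.Dict.ofList numAppears).items
  let p := (PySem.List.sorted2 items (fun kv => kv.2) (fun kv => kv.1)).foldl
      (fun (ab : List String × List String) kv => (ab.2, ab.1 ++ [kv.1])) ([], [])
  p.1 ++ p.2.reverse

-- ===== PORT B =====
def startingOrder_alt (numAppears : List (String × Int)) : List String :=
  let s := (PySem.List.sorted2 (PySem.Dict.ofList numAppears).items (fun kv => kv.2) (fun kv => kv.1)).map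
      (fun kv => kv.1)
  (PySem.List.enumerate s.reverse 1).foldl
    (fun out mx => if PySem.Int.mod mx.1 2 = 0 then [mx.2] ++ out else out ++ [mx.2]) []

-- ===== PRECONDITION & SPEC =====
def Spec_startingOrder (numAppears : List (String × Int)) (out : List String) : Prop := out = startingOrder_alt numAppears
instance (numAppears : List (String × Int)) (out : List String) : Decidable (Spec_startingOrder numAppears out) := by unfold Spec_startingOrder; infer_instance

-- ===== CLAIM (what is proved, stated in full; the proofs are below) =====
def Claim_equal_startingOrder : Prop := ∀ (numAppears : List (String × Int)), Dom_startingOrder numAppears → Spec_startingOrder numAppears (startingOrder numAppears)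

-- ===== LEMMAS AND PROOFS =====
-- (even-index elements, odd-index elements) of a list: a description of A's swap loop
def split2 : List String → List String × List String
  | [] => ([], [])
  | [x] => ([x], [])
  | x :: y :: t => let eo := split2 t; (x :: eo.1, y :: eo.2)

theorem split2_cons (x : String) (t : List String) :
    split2 (x :: t) = (x :: (split2 t).2, (split2 t).1) := by
  induction t generalizing x with
  | nil => rfl
  | cons y t' ih => simp [split2, ih y]

theorem foldl_swap_append (s : List String) (a b : List String) :
    s.foldl (fun (ab : List String × List String) k => (ab.2, ab.1 ++ [k])) (a, b) =
      if s.length % 2 = 0 then (a ++ (split2 s).1, b ++ (split2 s).2)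
      else (b ++ (split2 s).2, a ++ (split2 s).1) := by
  induction s generalizing a b with
  | nil => simp [split2]
  | cons x t ih =>
      rw [List.foldl_cons, ih, split2_cons]
      rcases Nat.even_or_odd t.length with h | h
      · simp [Nat.even_iff.mp h, List.length_cons, Nat.succ_mod_two_eq_one_iff.mpr (Nat.even_iff.mp h)]
      · simp [Nat.odd_iff.mp h, List.length_cons, Nat.succ_mod_two_eq_zero_iff.mpr (Nat.odd_iff.mp h)]

theorem pymod_two (j : Int) : PySem.Int.mod j 2 = j % 2 := by
  simp [PySem.Int.mod, Int.fmod_eq_emod]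

-- B's outside-in placement loop computes the same split2-based value as A's loop
theorem placeLoop_eq_split2 (s : List String) :
    (PySem.List.enumerate s.reverse 1).foldl
        (fun out mx => if PySem.Int.mod mx.1 2 = 0 then [mx.2] ++ out else out ++ [mx.2]) [] =
      if s.length % 2 = 0 then (split2 s).1 ++ (split2 s).2.reverse
      else (split2 s).2 ++ (split2 s).1.reverse := by
  induction s with
  | nil => simp [PySem.List.enumerate_nil, split2]
  | cons x t ih =>
      rw [show (x :: t).reverse = t.reverse ++ [x] by simp,
        PySem.List.enumerate_append, List.foldl_append, ih, split2_cons]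
      simp only [PySem.List.enumerate_cons, PySem.List.enumerate_nil, List.foldl_cons,
        List.foldl_nil, List.length_reverse, pymod_two]
      rcases Nat.even_or_odd t.length with h | h
      · have h1 : t.length % 2 = 0 := Nat.even_iff.mp h
        have h2 : ((1 : Int) + t.length) % 2 = 1 := by omega
        simp [h1, h2, List.length_cons, Nat.succ_mod_two_eq_one_iff.mpr h1]
      · have h1 : t.length % 2 = 1 := Nat.odd_iff.mp h
        have h2 : ((1 : Int) + t.length) % 2 = 0 := by omega
        simp [h1, h2, List.length_cons, Nat.succ_mod_two_eq_zero_iff.mpr h1]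

-- ===== VERDICT (by name: the statement is the Claim_ definition above) =====
theorem startingOrder_spec : Claim_equal_startingOrder := by
  intro numAppears _
  unfold Spec_startingOrder startingOrder startingOrder_alt
  dsimp only
  have hA := foldl_swap_append
    ((PySem.List.sorted2 (PySem.Dict.ofList numAppears).items (fun kv => kv.2) (fun kv => kv.1)).map
      (fun kv => kv.1)) [] []
  rw [List.foldl_map] at hA
  rw [hA, placeLoop_eq_split2, List.length_map]
  split <;> simp
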